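-- pv_equiv track=rewrite | github.com/atlasbuilds77/atlas-brain | atlas-eyes/src/atlas_query.py | _group_into_episodes
-- ===== SOURCE A (Python) =====
-- from typing import Optional, Dict, List
--
-- def _group_into_episodes(
--
--     events: List[Dict],
--     gap_seconds: int = 300
-- ) -> List[List[Dict]]:
--     """
--     Group events into episodes based on time gaps
--
--     Args:
--         events: List of events (must be sorted by timestamp)
--         gap_seconds: Maximum gap between events in same episode
--
--     Returns:
--         List of episodes (each episode is a list of events)
--     """
--     if not events:
--         return []
--
--     # Sort by timestamp
--     sorted_events = sorted(events, key=lambda x: x['timestamp'], reverse=True)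
--
--     episodes = []
--     current_episode = [sorted_events[0]]
--
--     for event in sorted_events[1:]:
--         # Check time gap from last event in current episode
--         gap = current_episode[-1]['timestamp'] - event['timestamp']
--
--         if gap <= gap_seconds:
--             current_episode.append(event)
--         else:
--             episodes.append(current_episode)
--             current_episode = [event]
--
--     # Add last episode
--     if current_episode:
--         episodes.append(current_episode)
--
--     return episodes
-- ===== SOURCE B (Python) =====
-- def _group_into_episodes(events, gap_seconds=300):
--     """Two-phase: find the cut indices where the descending-sorted gap exceeds
--     gap_seconds, then slice the sorted list at those boundaries."""
--     if not events:
--         return []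
--     s = sorted(events, key=lambda x: x['timestamp'], reverse=True)
--     n = len(s)
--     cuts = [0] + [i for i in range(1, n)
--                   if s[i - 1]['timestamp'] - s[i]['timestamp'] > gap_seconds] + [n]
--     return [s[a:b] for a, b in zip(cuts, cuts[1:])]
-- ===== Notes on version B (the rewrite author's own statement) =====
-- stated objective: alternative
-- what changed: A makes one incremental pass over the sorted events with a current-episode accumulator flushed at each large gap; B is a staged 'find boundaries, then partition' computation: it first collects the cut indices where the adjacent gap exceeds gap_seconds, then slices the sorted list at those cuts with zip(cuts, cuts[1:]).
import Mathlib
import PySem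

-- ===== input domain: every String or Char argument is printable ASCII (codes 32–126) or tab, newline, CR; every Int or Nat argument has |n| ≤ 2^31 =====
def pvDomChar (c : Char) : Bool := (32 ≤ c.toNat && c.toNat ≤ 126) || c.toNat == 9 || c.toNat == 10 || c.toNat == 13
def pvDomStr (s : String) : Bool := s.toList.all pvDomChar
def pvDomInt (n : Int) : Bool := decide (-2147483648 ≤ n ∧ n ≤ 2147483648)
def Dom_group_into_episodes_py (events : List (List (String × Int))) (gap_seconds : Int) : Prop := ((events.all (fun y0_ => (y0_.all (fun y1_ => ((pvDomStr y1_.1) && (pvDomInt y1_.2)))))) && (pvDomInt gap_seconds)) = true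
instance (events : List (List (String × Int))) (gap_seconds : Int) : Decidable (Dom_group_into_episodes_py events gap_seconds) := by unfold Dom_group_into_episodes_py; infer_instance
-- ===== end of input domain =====

-- B replaces A's single incremental accumulator pass by a staged computation: collect
-- the cut indices where the adjacent gap exceeds gap_seconds, then slice the sorted
-- list at those cuts (same cost; objective: alternative).

-- ===== PORT A =====
-- event['timestamp'] (Pre_ guarantees the key is present, so the default is never used)
def pvTs (d : List (String × Int)) : Int := ((PySem.Dict.mk d).get? "timestamp").getD 0

-- the 'for event in sorted_events[1:]' loop; cur[-1] via pyGet? (-1), never none on reachable states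
def pvLoopA (gap : Int) : List (List (String × Int)) → List (List (List (String × Int))) → List (List (String × Int)) → List (List (List (String × Int)))
  | [], episodes, cur => if cur ≠ [] then episodes ++ [cur] else episodes
  | e :: rest, episodes, cur =>
      let g := pvTs ((PySem.List.pyGet? cur (-1)).getD []) - pvTs e
      if g ≤ gap then pvLoopA gap rest episodes (cur ++ [e])
      else pvLoopA gap rest (episodes ++ [cur]) [e]

def group_into_episodes_py (events : List (List (String × Int))) (gap_seconds : Int) : List (List (List (String × Int))) :=
  if events = [] then []
  else
    let sorted_events := PySem.List.sorted events (fun x => pvTs x) true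
    pvLoopA gap_seconds (PySem.List.slice sorted_events (some 1) none) []
      [((PySem.List.pyGet? sorted_events 0).getD [])]

-- ===== PORT B =====
-- the comprehension's test: s[i-1]['timestamp'] - s[i]['timestamp'] > gap_seconds
def pvCutB (gap : Int) (s : List (List (String × Int))) (i : Int) : Bool :=
  decide (gap < pvTs ((PySem.List.pyGet? s (i - 1)).getD []) - pvTs ((PySem.List.pyGet? s i).getD []))

def group_into_episodes_py_alt (events : List (List (String × Int))) (gap_seconds : Int) : List (List (List (String × Int))) :=
  if events = [] then []
  else
    let s := PySem.List.sorted events (fun x => pvTs x) true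
    let n : Int := (s.length : Int)
    let cuts : List Int := 0 :: (PySem.List.pyRange 1 n 1).filter (pvCutB gap_seconds s) ++ [n]
    (cuts.zip (PySem.List.slice cuts (some 1) none)).map
      (fun ab => PySem.List.slice s (some ab.1) (some ab.2))

-- ===== PRECONDITION & SPEC =====
-- Pre_ excludes exactly the inputs where Python A raises KeyError: an event without a 'timestamp' key.
def Pre_group_into_episodes_py (events : List (List (String × Int))) (gap_seconds : Int) : Prop :=
  events.all (fun d => (PySem.Dict.mk d).contains "timestamp") = true
instance (events : List (List (String × Int))) (gap_seconds : Int) : Decidable (Pre_group_into_episodes_py events gap_seconds) := by unfold Pre_group_into_episodes_py; infer_instance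

def pvWitness_group_into_episodes_py : (List (List (String × Int))) × Int :=
  ([[("timestamp", 10)], [("timestamp", 400)], [("timestamp", 12)]], 300)

def Spec_group_into_episodes_py (events : List (List (String × Int))) (gap_seconds : Int) (out : List (List (List (String × Int)))) : Prop := out = group_into_episodes_py_alt events gap_seconds
instance (events : List (List (String × Int))) (gap_seconds : Int) (out : List (List (List (String × Int)))) : Decidable (Spec_group_into_episodes_py events gap_seconds out) := by unfold Spec_group_into_episodes_py; infer_instance

-- ===== CLAIM (what is proved, stated in full; the proofs are below) =====
def Claim_equal_group_into_episodes_py : Prop := ∀ (events : List (List (String × Int))) (gap_seconds : Int), Dom_group_into_episodes_py events gap_seconds → Pre_group_into_episodes_py events gap_seconds → Spec_group_into_episodes_py events gap_seconds (group_into_episodes_py events gap_seconds)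

-- ===== LEMMAS AND PROOFS =====

-- A reference chunking recursion both ports are reduced to.
def pvStepB (gap : Int) (e : List (String × Int)) (episodes : List (List (List (String × Int)))) : List (List (List (String × Int))) :=
  match episodes with
  | (f :: fs) :: cs => if pvTs e - pvTs f ≤ gap then (e :: f :: fs) :: cs else [e] :: (f :: fs) :: cs
  | eps => [e] :: eps

def pvChunks (gap : Int) (l : List (List (String × Int))) : List (List (List (String × Int))) :=
  l.foldr (pvStepB gap) []

-- how A's pending episode 'cur' merges with the episodes of the tail
def pvGlue (gap : Int) (cur : List (List (String × Int))) (chunks : List (List (List (String × Int)))) : List (List (List (String × Int))) :=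
  match chunks with
  | (f :: fs) :: cs =>
      if pvTs ((PySem.List.pyGet? cur (-1)).getD []) - pvTs f ≤ gap then (cur ++ f :: fs) :: cs
      else cur :: (f :: fs) :: cs
  | x => cur :: x

theorem pvStepB_head (gap : Int) (e : List (String × Int)) (acc : List (List (List (String × Int)))) :
    ∃ t cs, pvStepB gap e acc = (e :: t) :: cs := by
  match acc with
  | [] => exact ⟨[], [], rfl⟩
  | [] :: cs => exact ⟨[], [] :: cs, rfl⟩
  | (f :: fs) :: cs =>
    simp only [pvStepB]
    split
    · exact ⟨f :: fs, cs, rfl⟩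
    · exact ⟨[], (f :: fs) :: cs, rfl⟩

theorem pvGlue_singleton (gap : Int) (e : List (String × Int)) (chunks : List (List (List (String × Int)))) :
    pvGlue gap [e] chunks = pvStepB gap e chunks := by
  match chunks with
  | [] => rfl
  | [] :: cs => rfl
  | (f :: fs) :: cs =>
    simp only [pvGlue, pvStepB, PySem.List.pyGet?_neg_one, List.getLast?_singleton, Option.getD_some,
      List.singleton_append]

theorem pvLoopA_eq_glue (gap : Int) (rest : List (List (String × Int)))
    (eps : List (List (List (String × Int)))) (cur : List (List (String × Int))) (hc : cur ≠ []) :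
    pvLoopA gap rest eps cur = eps ++ pvGlue gap cur (pvChunks gap rest) := by
  induction rest generalizing eps cur with
  | nil =>
    simp [pvLoopA, hc, pvChunks, pvGlue]
  | cons e rs ih =>
    have hlast : (PySem.List.pyGet? (cur ++ [e]) (-1)).getD [] = e := by
      rw [PySem.List.pyGet?_neg_one_append_singleton]; rfl
    simp only [pvLoopA]
    have hch : pvChunks gap (e :: rs) = pvStepB gap e (pvChunks gap rs) := rfl
    split
    · rename_i hg
      rw [ih eps (cur ++ [e]) (by simp)]
      congr 1
      rw [hch]
      match hrs : pvChunks gap rs with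
      | [] =>
        simp only [pvStepB, pvGlue, hg, if_pos]
      | [] :: cs =>
        simp only [pvStepB, pvGlue, hg, if_pos]
      | (f :: fs) :: cs =>
        simp only [pvStepB]
        split
        · rename_i h2
          simp only [pvGlue, hlast]
          rw [if_pos hg, if_pos h2]
          simp
        · rename_i h2
          simp only [pvGlue, hlast]
          rw [if_pos hg, if_neg h2]
    · rename_i hg
      rw [ih (eps ++ [cur]) [e] (by simp)]
      rw [pvGlue_singleton, List.append_assoc]
      congr 1
      rw [hch]
      obtain ⟨t, cs, hshape⟩ := pvStepB_head gap e (pvChunks gap rs)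
      rw [hshape]
      simp only [pvGlue]
      rw [if_neg hg]
      rfl

-- zip-with-tail slicing, as B's comprehension computes it
def pvSliceZip (s : List (List (String × Int))) (cuts : List Int) : List (List (List (String × Int))) :=
  (cuts.zip cuts.tail).map (fun ab => PySem.List.slice s (some ab.1) (some ab.2))

theorem pvGetShift {α : Type} (e : α) (u : List α) (j : Int) (h : 1 ≤ j) :
    PySem.List.pyGet? (e :: u) j = PySem.List.pyGet? u (j - 1) := by
  have h0 : (0:Int) ≤ j := by omega
  by_cases hle : j ≤ (u.length : Int)
  · simp only [PySem.List.pyGet?, PySem.List.pyIdx?, List.length_cons]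
    rw [if_pos h0, if_pos (by push_cast; omega), if_pos (by omega), if_pos (by omega)]
    obtain ⟨k, hk⟩ : ∃ k, j.toNat = k + 1 := ⟨j.toNat - 1, by omega⟩
    simp [hk, show (j-1).toNat = k by omega]
  · simp only [PySem.List.pyGet?, PySem.List.pyIdx?, List.length_cons]
    rw [if_pos h0, if_neg (by push_cast; omega), if_pos (by omega), if_neg (by omega)]
    simp

theorem pvRangeShift (a b : Int) :
    PySem.List.pyRange (a+1) (b+1) 1 = (PySem.List.pyRange a b 1).map (· + 1) := by
  rw [PySem.List.pyRange_one, PySem.List.pyRange_one]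
  simp only [List.map_map, add_sub_add_right_eq_sub]
  exact List.map_congr_left (fun k _ => by simp [Function.comp]; ring)

theorem pvSliceShift {α : Type} (e : α) (u : List α) (a b : Int) (ha : 0 ≤ a) (hb : 0 ≤ b) :
    PySem.List.slice (e :: u) (some (a+1)) (some (b+1)) = PySem.List.slice u (some a) (some b) := by
  rw [PySem.List.slice_toNat _ (by omega : (0:Int) ≤ a+1) (by omega : (0:Int) ≤ b+1),
      PySem.List.slice_toNat _ ha hb]
  rw [show (a+1).toNat = a.toNat + 1 by omega, show (b+1).toNat = b.toNat + 1 by omega]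
  simp [Nat.succ_sub_succ]

theorem pvTake1 {α : Type} (u : List α) (d : Int) (hd : 0 ≤ d) :
    PySem.List.slice u (some 0) (some d) = u.take d.toNat := by
  rw [PySem.List.slice_toNat _ (by omega) hd]
  simp

theorem pvCutShift (gap : Int) (e : List (String × Int)) (u : List (List (String × Int)))
    (i : Int) (h : 1 ≤ i) : pvCutB gap (e :: u) (i + 1) = pvCutB gap u i := by
  unfold pvCutB
  rw [show i + 1 - 1 = i by ring, pvGetShift e u i h, pvGetShift e u (i+1) (by omega),
      show i + 1 - 1 = i by ring]

theorem pvSliceZip_cons_cons (s : List (List (String × Int))) (a b : Int) (rest : List Int) :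
    pvSliceZip s (a :: b :: rest) = PySem.List.slice s (some a) (some b) :: pvSliceZip s (b :: rest) := rfl

theorem pvSliceZip_shift (e : List (String × Int)) (u : List (List (String × Int))) :
    ∀ (L : List Int), (∀ c ∈ L, 0 ≤ c) →
    pvSliceZip (e :: u) (L.map (· + 1)) = pvSliceZip u L
  | [], _ => rfl
  | [a], _ => rfl
  | a :: b :: t, hL => by
    have h1 := pvSliceZip_shift e u (b :: t) (fun c hc => hL c (List.mem_cons_of_mem a hc))
    simp only [List.map_cons] at h1 ⊢
    rw [pvSliceZip_cons_cons, pvSliceZip_cons_cons, h1,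
        pvSliceShift e u a b (hL a (by simp)) (hL b (by simp))]

theorem pvMain (gap : Int) (u : List (List (String × Int))) : ∀ (e : List (String × Int)),
    pvSliceZip (e :: u) (0 :: (PySem.List.pyRange 1 (((e :: u).length : Int)) 1).filter (pvCutB gap (e :: u)) ++ [(((e :: u).length : Int))])
      = pvChunks gap (e :: u) := by
  induction u with
  | nil =>
    intro e
    have h1 : (((e :: ([] : List (List (String × Int)))).length : Int)) = 1 := by simp
    rw [h1, PySem.List.pyRange_one_eq_nil le_rfl]
    show pvSliceZip [e] [0, 1] = _
    rw [pvSliceZip_cons_cons, pvTake1 _ _ (by omega)]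
    rfl
  | cons f t ih =>
    intro e
    set u' := f :: t with hu'
    have hm : (1:Int) ≤ (u'.length : Int) := by simp [hu']
    -- the index list of s = e :: u'
    have hlen : (((e :: u').length : Int)) = (u'.length : Int) + 1 := by push_cast [List.length_cons]; ring
    rw [hlen, PySem.List.pyRange_one_cons (by omega), pvRangeShift 1 (u'.length : Int),
        List.filter_cons, List.filter_map]
    have hcong : (PySem.List.pyRange 1 (u'.length : Int) 1).filter (pvCutB gap (e :: u') ∘ (· + 1))
        = (PySem.List.pyRange 1 (u'.length : Int) 1).filter (pvCutB gap u') := by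
      refine List.filter_congr (fun i hi => ?_)
      have := PySem.List.mem_pyRange_one.mp hi
      exact pvCutShift gap e u' i this.1
    rw [hcong]
    -- abbreviations
    set D : List Int := (PySem.List.pyRange 1 (u'.length : Int) 1).filter (pvCutB gap u') with hD
    set T : List Int := D ++ [(u'.length : Int)] with hT
    have hTpos : ∀ c ∈ T, 1 ≤ c := by
      intro c hc
      rcases List.mem_append.mp hc with h | h
      · exact (PySem.List.mem_pyRange_one.mp (List.mem_of_mem_filter h)).1
      · simp at h; omega
    obtain ⟨d, T', hdT⟩ : ∃ d T', T = d :: T' := by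
      cases hE : D with
      | nil => exact ⟨_, _, by rw [hT, hE]; rfl⟩
      | cons x xs => exact ⟨_, _, by rw [hT, hE]; rfl⟩
    have hd1 : 1 ≤ d := hTpos d (by rw [hdT]; simp)
    -- the induction hypothesis, phrased for u' = f :: t
    have hIH : pvSliceZip u' (0 :: T) = pvChunks gap u' := by
      have := ih f
      rw [← hu'] at this
      rw [hT, hD]
      exact this
    -- first chunk of u' starts with f
    obtain ⟨k, hk⟩ : ∃ k, d.toNat = k + 1 := ⟨d.toNat - 1, by omega⟩
    have hhead : PySem.List.slice u' (some 0) (some d) = f :: t.take k := by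
      rw [pvTake1 _ _ (by omega), hu', hk]; rfl
    have hchunks : pvChunks gap u' = (f :: t.take k) :: pvSliceZip u' (d :: T') := by
      rw [← hIH, hdT, pvSliceZip_cons_cons, hhead]
    -- head comparison test c1
    have hget0 : PySem.List.pyGet? (e :: u') ((1:Int) - 1) = some e := by
      norm_num [PySem.List.pyGet?_zero_cons]
    have hget1 : PySem.List.pyGet? (e :: u') 1 = some f := by
      rw [pvGetShift e u' 1 le_rfl]
      norm_num [hu', PySem.List.pyGet?_zero_cons]
    have hc1 : pvCutB gap (e :: u') 1 = decide (gap < pvTs e - pvTs f) := by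
      unfold pvCutB
      rw [hget0, hget1]
      rfl
    by_cases hc : gap < pvTs e - pvTs f
    · -- cut right after e: episodes = [e] :: chunks u'
      rw [hc1]
      simp only [decide_eq_true_eq, hc, if_pos]
      -- cuts = 0 :: 1 :: D.map(+1) ++ [m+1] = 0 :: 1 :: T.map (+1)
      simp only [List.cons_append]
      have hcuts : (1:Int) :: (D.map (· + 1) ++ [((u'.length : Int) + 1)]) = 1 :: T.map (· + 1) := by
        rw [hT]; simp
      rw [hcuts]
      rw [pvSliceZip_cons_cons, pvTake1 _ _ (by omega : (0:Int) ≤ 1)]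
      have hshift : pvSliceZip (e :: u') ((0 :: T).map (· + 1)) = pvSliceZip u' (0 :: T) :=
        pvSliceZip_shift e u' (0 :: T) (by intro c hc'; rcases List.mem_cons.mp hc' with h | h; omega; exact le_trans (by omega) (hTpos c h))
      simp only [List.map_cons] at hshift
      norm_num at hshift
      rw [hshift, hIH]
      -- RHS
      show List.take 1 (e :: u') :: pvChunks gap u' = pvChunks gap (e :: u')
      rw [show pvChunks gap (e :: u') = pvStepB gap e (pvChunks gap u') from rfl, hchunks]
      simp only [pvStepB]
      rw [if_neg (by omega)]
      rfl
    · -- no cut: e joins the first chunk of u'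
      rw [hc1]
      simp only [decide_eq_true_eq, hc, if_neg, not_false_iff]
      simp only [List.cons_append]
      have hcuts : D.map (· + 1) ++ [((u'.length : Int) + 1)] = T.map (· + 1) := by
        rw [hT]; simp
      rw [hcuts, hdT]
      simp only [List.map_cons]
      rw [pvSliceZip_cons_cons]
      have hshift : pvSliceZip (e :: u') ((d :: T').map (· + 1)) = pvSliceZip u' (d :: T') :=
        pvSliceZip_shift e u' (d :: T') (by intro c hc'; exact le_trans (by omega) (hTpos c (by rw [hdT]; exact hc')))
      simp only [List.map_cons] at hshift
      rw [hshift]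
      have hslice0 : PySem.List.slice (e :: u') (some 0) (some (d + 1)) = e :: (f :: t.take k) := by
        rw [pvTake1 _ _ (by omega), show (d+1).toNat = d.toNat + 1 by omega, hk, hu']
        rfl
      rw [hslice0]
      show _ = pvChunks gap (e :: u')
      rw [show pvChunks gap (e :: u') = pvStepB gap e (pvChunks gap u') from rfl, hchunks]
      simp only [pvStepB]
      rw [if_pos (by omega)]

-- ===== VERDICT (by name: the statement is the Claim_ definition above) =====
theorem group_into_episodes_py_spec : Claim_equal_group_into_episodes_py := by
  intro events gap _ _
  unfold Spec_group_into_episodes_py group_into_episodes_py group_into_episodes_py_alt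
  by_cases h : events = []
  · subst h; rfl
  · simp only [h, if_neg, not_false_iff]
    have hs : PySem.List.sorted events (fun x => pvTs x) true ≠ [] := by
      rw [Ne, PySem.List.sorted_eq_nil_iff]; exact h
    match hse : PySem.List.sorted events (fun x => pvTs x) true with
    | [] => exact absurd hse hs
    | s0 :: srest =>
      rw [PySem.List.slice_from_one, PySem.List.pyGet?_zero_cons]
      simp only [List.tail_cons, Option.getD_some]
      rw [pvLoopA_eq_glue gap srest [] [s0] (by simp), pvGlue_singleton]
      rw [PySem.List.slice_from_one]
      have hm := pvMain gap srest s0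
      rw [pvSliceZip] at hm
      rw [hm]
      rfl
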